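-- pv_equiv track=rewrite | github.com/jeremyfleche/Advent-of-Code | 2022/23/23_v2.py | position_suivante
-- ===== SOURCE A (Python) =====
-- orientation = ['N','S','O','E']
--
-- def position_suivante_facing(facing,x,y):
-- 	if facing == 'N':
-- 		return x,y-1
-- 	elif facing == 'S':
-- 		return x,y+1
-- 	elif facing == 'O':
-- 		return x-1,y
-- 	else:
-- 		return x+1,y
--
-- def bouge_pas(d,x,y):
-- 	voisins = {(x-1,y-1),(x,y-1),(x+1,y-1),(x-1,y),(x+1,y),(x-1,y+1),(x,y+1),(x+1,y+1)}
-- 	for (x,y) in voisins: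
-- 		try:
-- 			if d[(x,y)] == '#':
-- 				return False
-- 		except:
-- 			pass
-- 	return True
--
-- def position_suivante(d,tour,x,y):
-- 	if bouge_pas(d,x,y):
-- 		return x,y
-- 	i = 0
-- 	while i<4:
-- 		facing = orientation[(tour+1)%4]
-- 		x1,y1 = position_suivante_facing(facing,x,y)
-- 		try:
-- 			if d[(x1,y1)] == '#':
-- 				pass
-- 			else:
-- 				return x1,y1
-- 		except:
-- 			return x1,y1
-- 		i += 1
-- 	return x,y
-- ===== SOURCE B (Python) =====
-- # B: never indexes the dict -- one filter pass over d.items() collects the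
-- # occupied cells adjacent to (x,y); both decisions (stay-put, target blocked)
-- # are membership tests on that list (objective: alternative).
--
-- def position_suivante(d, tour, x, y):
--     near = [(a, b) for (a, b), v in d.items()
--             if v == '#' and (a, b) != (x, y)
--             and abs(a - x) <= 1 and abs(b - y) <= 1]
--     if not near:
--         return (x, y)
--     dx, dy = ((0, -1), (0, 1), (-1, 0), (1, 0))[(tour + 1) % 4]
--     if (x + dx, y + dy) in near:
--         return (x, y)
--     return (x + dx, y + dy)
-- ===== Notes on version B (the rewrite author's own statement) =====
-- stated objective: alternative
-- what changed: B never indexes the dict: a single filter pass over d.items() collects the occupied cells within Chebyshev distance 1 of (x,y), and both decisions (any neighbour occupied; chosen target blocked) become membership tests on that list, replacing A's nine try/except point probes and its counter-invariant 4-iteration while loop; this trades O(1) dict probes for one O(|d|) scan.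
import Mathlib
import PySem

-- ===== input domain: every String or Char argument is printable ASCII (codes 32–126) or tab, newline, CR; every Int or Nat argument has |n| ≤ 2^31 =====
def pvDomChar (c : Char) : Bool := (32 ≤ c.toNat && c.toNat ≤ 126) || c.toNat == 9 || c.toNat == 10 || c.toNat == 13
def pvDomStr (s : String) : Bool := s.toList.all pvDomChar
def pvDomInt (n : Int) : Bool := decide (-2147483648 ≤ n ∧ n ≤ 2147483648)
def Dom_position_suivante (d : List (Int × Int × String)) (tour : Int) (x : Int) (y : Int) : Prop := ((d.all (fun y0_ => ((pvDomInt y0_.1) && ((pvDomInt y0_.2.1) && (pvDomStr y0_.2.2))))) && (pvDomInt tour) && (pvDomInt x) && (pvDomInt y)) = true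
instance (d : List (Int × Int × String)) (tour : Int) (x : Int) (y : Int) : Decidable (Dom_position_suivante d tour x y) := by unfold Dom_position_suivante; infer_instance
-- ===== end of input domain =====

-- B replaces A's nine try/except dict probes and its counter-invariant 4-iteration
-- loop by one filter pass over the dict's items plus membership tests (objective: alternative).

-- ===== PORT A =====
-- d[(a,b)] with try/except: first-match association-list lookup (none = KeyError, caught by A)
def lookupA (d : List (Int × Int × String)) (a b : Int) : Option String :=
  match d with
  | [] => none
  | e :: t => if e.1 = a ∧ e.2.1 = b then some e.2.2 else lookupA t a b

def orientationA : List String := ["N", "S", "O", "E"]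

def position_suivante_facingA (facing : String) (x y : Int) : Int × Int :=
  if facing = "N" then (x, y - 1)
  else if facing = "S" then (x, y + 1)
  else if facing = "O" then (x - 1, y)
  else (x + 1, y)

-- Python iterates a SET of these 8 pairwise-distinct neighbours; the loop's result
-- (does any neighbour hold '#'?) is independent of iteration order, so we iterate
-- them in the literal order.
def bougePasLoopA (d : List (Int × Int × String)) : List (Int × Int) → Bool
  | [] => true
  | p :: t =>
    match lookupA d p.1 p.2 with
    | some v => if v = "#" then false else bougePasLoopA d t
    | none => bougePasLoopA d t

def voisinsA (x y : Int) : List (Int × Int) :=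
  [(x-1,y-1),(x,y-1),(x+1,y-1),(x-1,y),(x+1,y),(x-1,y+1),(x,y+1),(x+1,y+1)]

def bougePasA (d : List (Int × Int × String)) (x y : Int) : Bool :=
  bougePasLoopA d (voisinsA x y)

-- the while-loop: fuel counts the remaining iterations (4 - i); fuel 0 = fallthrough return x,y
def loopA (d : List (Int × Int × String)) (tour x y : Int) : Nat → Int × Int
  | 0 => (x, y)
  | n + 1 =>
    -- orientation[(tour+1)%4]: index is in [0,4), so the get never fails; getD "" is exact here
    let facing := (PySem.List.pyGet? orientationA (PySem.Int.mod (tour + 1) 4)).getD ""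
    let p := position_suivante_facingA facing x y
    match lookupA d p.1 p.2 with
    | some v => if v = "#" then loopA d tour x y n else p
    | none => p

def position_suivante (d : List (Int × Int × String)) (tour : Int) (x : Int) (y : Int) : Int × Int :=
  if bougePasA d x y then (x, y) else loopA d tour x y 4

-- ===== PORT B =====
-- the list comprehension over d.items(): filter, then project the key
def nearB (d : List (Int × Int × String)) (x y : Int) : List (Int × Int) :=
  (d.filter (fun e =>
      e.2.2 == "#" && !((e.1, e.2.1) == (x, y)) && decide (|e.1 - x| ≤ 1) && decide (|e.2.1 - y| ≤ 1))).map
    (fun e => (e.1, e.2.1))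

def deltasB : List (Int × Int) := [(0, -1), (0, 1), (-1, 0), (1, 0)]

def position_suivante_alt (d : List (Int × Int × String)) (tour : Int) (x : Int) (y : Int) : Int × Int :=
  let near := nearB d x y
  if near.isEmpty then (x, y)
  else
    -- tuple index (tour+1)%4 is in [0,4), never fails; getD (0,0) is exact here
    let dd := (PySem.List.pyGet? deltasB (PySem.Int.mod (tour + 1) 4)).getD (0, 0)
    if near.contains (x + dd.1, y + dd.2) then (x, y)
    else (x + dd.1, y + dd.2)

-- ===== PRECONDITION & SPEC =====
-- Pre_ excludes association lists with duplicate keys: those represent no Python dict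
-- (a dict's keys are unique), and there A's first-match lookup and B's full-items scan
-- could disagree. Every input coming from a real dict satisfies Pre_.
def Pre_position_suivante (d : List (Int × Int × String)) (tour : Int) (x : Int) (y : Int) : Prop :=
  (d.map (fun e => (e.1, e.2.1))).Nodup
instance (d : List (Int × Int × String)) (tour : Int) (x : Int) (y : Int) : Decidable (Pre_position_suivante d tour x y) := by unfold Pre_position_suivante; infer_instance

def pvWitness_position_suivante : (List (Int × Int × String)) × Int × Int × Int :=
  ([(0, 0, "#"), (1, 0, "#"), (2, 2, ".")], 1, 0, 0)

def Spec_position_suivante (d : List (Int × Int × String)) (tour : Int) (x : Int) (y : Int) (out : Int × Int) : Prop := out = position_suivante_alt d tour x y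
instance (d : List (Int × Int × String)) (tour : Int) (x : Int) (y : Int) (out : Int × Int) : Decidable (Spec_position_suivante d tour x y out) := by unfold Spec_position_suivante; infer_instance

-- ===== CLAIM (what is proved, stated in full; the proofs are below) =====
def Claim_equal_position_suivante : Prop := ∀ (d : List (Int × Int × String)) (tour : Int) (x : Int) (y : Int), Dom_position_suivante d tour x y → Pre_position_suivante d tour x y → Spec_position_suivante d tour x y (position_suivante d tour x y)

-- ===== LEMMAS AND PROOFS =====

theorem lookupA_mem (d : List (Int × Int × String)) (a b : Int) (v : String)
    (h : lookupA d a b = some v) : (a, b, v) ∈ d := by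
  induction d with
  | nil => simp [lookupA] at h
  | cons e t ih =>
    simp only [lookupA] at h
    split at h
    · rename_i hk
      cases h; cases e with | mk e1 e2 => cases e2 with | mk e21 e22 =>
      simp_all
    · exact List.mem_cons_of_mem _ (ih h)

theorem lookupA_of_mem (d : List (Int × Int × String)) (a b : Int) (v : String)
    (hnd : (d.map (fun e => (e.1, e.2.1))).Nodup)
    (h : (a, b, v) ∈ d) : lookupA d a b = some v := by
  induction d with
  | nil => simp at h
  | cons e t ih =>
    simp only [List.map_cons, List.nodup_cons] at hnd
    rcases List.mem_cons.mp h with he | ht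
    · subst he; simp [lookupA]
    · have hk : ¬(e.1 = a ∧ e.2.1 = b) := by
        rintro ⟨h1, h2⟩
        exact hnd.1 (by simpa [h1, h2] using List.mem_map_of_mem (f := fun e => (e.1, e.2.1)) ht)
      simp only [lookupA, if_neg hk]
      exact ih hnd.2 ht

-- a key holds '#' (first-match) iff the binding (·,·,"#") occurs, under Nodup keys
theorem lookupA_sharp_iff (d : List (Int × Int × String)) (a b : Int)
    (hnd : (d.map (fun e => (e.1, e.2.1))).Nodup) :
    lookupA d a b = some "#" ↔ (a, b, "#") ∈ d :=
  ⟨lookupA_mem d a b "#", lookupA_of_mem d a b "#" hnd⟩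

-- membership in B's comprehension result
theorem mem_nearB (d : List (Int × Int × String)) (x y a b : Int) :
    (a, b) ∈ nearB d x y ↔
      (a, b, "#") ∈ d ∧ (a, b) ≠ (x, y) ∧ |a - x| ≤ 1 ∧ |b - y| ≤ 1 := by
  simp only [nearB, List.mem_map, List.mem_filter]
  constructor
  · rintro ⟨e, ⟨hmem, hp⟩, hkey⟩
    cases e with | mk e1 e2 => cases e2 with | mk e21 e22 =>
    simp only [Prod.mk.injEq] at hkey
    obtain ⟨h1, h2⟩ := hkey; subst h1; subst h2
    simp only [Bool.and_eq_true, beq_iff_eq, Bool.not_eq_eq_eq_not, Bool.not_true,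
      beq_eq_false_iff_ne, ne_eq, decide_eq_true_eq] at hp
    exact ⟨by simpa [hp.1.1.1] using hmem, hp.1.1.2, hp.1.2, hp.2⟩
  · rintro ⟨hmem, hne, h1, h2⟩
    refine ⟨(a, b, "#"), ⟨hmem, ?_⟩, rfl⟩
    simp [hne, h1, h2]

-- the 8 neighbours are exactly the cells at Chebyshev distance ≤ 1 other than (x,y)
theorem mem_voisinsA (x y a b : Int) :
    (a, b) ∈ voisinsA x y ↔ (a, b) ≠ (x, y) ∧ |a - x| ≤ 1 ∧ |b - y| ≤ 1 := by
  simp only [voisinsA, List.mem_cons, List.not_mem_nil, or_false, Prod.mk.injEq, ne_eq, not_and,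
    abs_le]
  constructor
  · rintro (h | h | h | h | h | h | h | h) <;> obtain ⟨h1, h2⟩ := h <;> subst h1 <;> subst h2 <;>
      refine ⟨by intro h1 h2; omega, by omega, by omega⟩
  · rintro ⟨hne, ⟨l1, r1⟩, l2, r2⟩
    have : a ≠ x ∨ b ≠ y := by
      by_cases h : a = x
      · exact Or.inr (hne h)
      · exact Or.inl h
    omega

-- A's early-return neighbour loop is an any-scan
theorem bougePasLoopA_eq_any (d : List (Int × Int × String)) (L : List (Int × Int)) :
    bougePasLoopA d L = !(L.any (fun p => lookupA d p.1 p.2 == some "#")) := by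
  induction L with
  | nil => rfl
  | cons p t ih =>
    simp only [bougePasLoopA, List.any]
    cases h : lookupA d p.1 p.2 with
    | none => simp [ih]
    | some v =>
      by_cases hv : v = "#"
      · simp [hv]
      · simp [hv, ih]

-- A stays put for the neighbour scan iff B's comprehension is empty
theorem bougePasA_iff_nearB_nil (d : List (Int × Int × String)) (x y : Int)
    (hnd : (d.map (fun e => (e.1, e.2.1))).Nodup) :
    bougePasA d x y = true ↔ nearB d x y = [] := by
  rw [bougePasA, bougePasLoopA_eq_any]
  simp only [Bool.not_eq_eq_eq_not, Bool.not_true, List.any_eq_false, beq_iff_eq]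
  rw [List.eq_nil_iff_forall_not_mem]
  constructor
  · intro h p hp
    obtain ⟨a, b⟩ := p
    obtain ⟨hmem, hne, h1, h2⟩ := (mem_nearB d x y a b).mp hp
    exact h (a, b) ((mem_voisinsA x y a b).mpr ⟨hne, h1, h2⟩)
      ((lookupA_sharp_iff d a b hnd).mpr hmem)
  · intro h p hp hl
    obtain ⟨a, b⟩ := p
    obtain ⟨hne, h1, h2⟩ := (mem_voisinsA x y a b).mp hp
    exact h (a, b) ((mem_nearB d x y a b).mpr ⟨(lookupA_sharp_iff d a b hnd).mp hl, hne, h1, h2⟩)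

-- A's target (via orientation string) equals B's target (via delta table)
theorem target_eq (tour x y : Int) :
    position_suivante_facingA
        ((PySem.List.pyGet? orientationA (PySem.Int.mod (tour + 1) 4)).getD "") x y
      = (x + ((PySem.List.pyGet? deltasB (PySem.Int.mod (tour + 1) 4)).getD (0, 0)).1,
         y + ((PySem.List.pyGet? deltasB (PySem.Int.mod (tour + 1) 4)).getD (0, 0)).2) := by
  have hm0 : 0 ≤ PySem.Int.mod (tour + 1) 4 := PySem.Int.mod_nonneg _ (by norm_num)
  have hm4 : PySem.Int.mod (tour + 1) 4 < 4 := PySem.Int.mod_lt _ (by norm_num)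
  set m := PySem.Int.mod (tour + 1) 4 with hm
  have hcases : m = 0 ∨ m = 1 ∨ m = 2 ∨ m = 3 := by omega
  rcases hcases with h | h | h | h <;>
    simp [h, orientationA, deltasB, position_suivante_facingA, PySem.List.pyGet?,
      PySem.List.pyIdx?, Prod.ext_iff] <;> omega

-- the chosen delta is one unit step: target is adjacent and distinct from (x,y)
theorem delta_step (tour : Int) :
    |((PySem.List.pyGet? deltasB (PySem.Int.mod (tour + 1) 4)).getD (0, 0)).1| ≤ 1 ∧
    |((PySem.List.pyGet? deltasB (PySem.Int.mod (tour + 1) 4)).getD (0, 0)).2| ≤ 1 ∧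
    (PySem.List.pyGet? deltasB (PySem.Int.mod (tour + 1) 4)).getD (0, 0) ≠ (0, 0) := by
  have hm0 : 0 ≤ PySem.Int.mod (tour + 1) 4 := PySem.Int.mod_nonneg _ (by norm_num)
  have hm4 : PySem.Int.mod (tour + 1) 4 < 4 := PySem.Int.mod_lt _ (by norm_num)
  set m := PySem.Int.mod (tour + 1) 4 with hm
  have hcases : m = 0 ∨ m = 1 ∨ m = 2 ∨ m = 3 := by omega
  rcases hcases with h | h | h | h <;>
    simp [h, deltasB, PySem.List.pyGet?, PySem.List.pyIdx?]

-- A's while loop always probes the same target, so four iterations collapse to one test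
theorem loopA_eq (d : List (Int × Int × String)) (tour x y : Int) :
    loopA d tour x y 4 =
      (if lookupA d
            (position_suivante_facingA
              ((PySem.List.pyGet? orientationA (PySem.Int.mod (tour + 1) 4)).getD "") x y).1
            (position_suivante_facingA
              ((PySem.List.pyGet? orientationA (PySem.Int.mod (tour + 1) 4)).getD "") x y).2
          == some "#"
       then (x, y)
       else position_suivante_facingA
              ((PySem.List.pyGet? orientationA (PySem.Int.mod (tour + 1) 4)).getD "") x y) := by
  simp only [loopA]
  cases h : lookupA d
      (position_suivante_facingA
        ((PySem.List.pyGet? orientationA (PySem.Int.mod (tour + 1) 4)).getD "") x y).1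
      (position_suivante_facingA
        ((PySem.List.pyGet? orientationA (PySem.Int.mod (tour + 1) 4)).getD "") x y).2 with
  | none => rfl
  | some v =>
    by_cases hv : v = "#"
    · simp only [hv, if_pos, beq_self_eq_true]
    · simp only [hv, if_neg, not_false_iff, beq_iff_eq, Option.some.injEq]

-- ===== VERDICT (by name: the statement is the Claim_ definition above) =====
theorem position_suivante_spec : Claim_equal_position_suivante := by
  intro d tour x y _ hnd
  unfold Pre_position_suivante at hnd
  unfold Spec_position_suivante position_suivante position_suivante_alt
  by_cases hb : bougePasA d x y = true
  · have hnil : nearB d x y = [] := (bougePasA_iff_nearB_nil d x y hnd).mp hb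
    simp [hb, hnil]
  · have hnn : ¬ nearB d x y = [] := fun h => hb ((bougePasA_iff_nearB_nil d x y hnd).mpr h)
    simp only [hb, if_false, List.isEmpty_iff, hnn]
    rw [loopA_eq, target_eq]
    obtain ⟨hd1, hd2, hdne⟩ := delta_step tour
    set dd := (PySem.List.pyGet? deltasB (PySem.Int.mod (tour + 1) 4)).getD (0, 0) with hdd
    have htmem : (x + dd.1, y + dd.2) ∈ nearB d x y ↔ lookupA d (x + dd.1) (y + dd.2) = some "#" := by
      rw [mem_nearB]
      constructor
      · rintro ⟨hm, _, _, _⟩; exact (lookupA_sharp_iff d _ _ hnd).mpr hm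
      · intro hl
        refine ⟨(lookupA_sharp_iff d _ _ hnd).mp hl, ?_,
          by simp only [add_sub_cancel_left]; exact hd1,
          by simp only [add_sub_cancel_left]; exact hd2⟩
        intro hc
        simp only [Prod.mk.injEq] at hc
        exact hdne (Prod.ext (by omega) (by omega))
    simp [htmem]
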